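-- pv_equiv track=rewrite | github.com/CEA-MetroCarac/PySSPFM | PySSPFM/utils/core/path_management.py | extract_unique_numbers
-- ===== SOURCE A (Python) =====
-- def extract_unique_numbers(lists):
--     """
--     Find unique numbers in lists.
--
--     Parameters
--     ----------
--     lists: list of lists
--         List of lists containing numbers.
--
--     Returns
--     -------
--     list of lists
--         List of lists containing unique numbers.
--     common_numbers: list
--         Common numbers shared by all sublists.
--     indice_column: int or None
--         Index of the column where the uniqueness is broken,
--         or None if all columns are unique.
--     """
--     common_numbers, unique_numbers = [], []
--     indice_column = None
--     for cont, columns in enumerate(zip(*lists)):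
--         if len(set(columns)) == 1:
--             common_numbers.append(columns[0])
--         else:
--             unique_numbers = list(columns)
--             indice_column = cont
--
--     return unique_numbers, common_numbers, indice_column
-- ===== SOURCE B (Python) =====
-- def extract_unique_numbers(lists):
--     cols = list(zip(*lists))
--     common_numbers = [c[0] for c in cols if len(set(c)) == 1]
--     unique_numbers, indice_column = [], None
--     for i in range(len(cols) - 1, -1, -1):
--         if len(set(cols[i])) > 1:
--             unique_numbers = list(cols[i])
--             indice_column = i
--             break
--     return unique_numbers, common_numbers, indice_column
-- ===== Notes on version B (the rewrite author's own statement) =====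
-- stated objective: alternative
-- what changed: A classifies every column in one forward fold that keeps overwriting (unique_numbers, indice_column); B materializes the columns once, builds common_numbers with a forward comprehension and finds the broken column by a separate backward scan with early exit at the first non-uniform column.
import Mathlib
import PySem

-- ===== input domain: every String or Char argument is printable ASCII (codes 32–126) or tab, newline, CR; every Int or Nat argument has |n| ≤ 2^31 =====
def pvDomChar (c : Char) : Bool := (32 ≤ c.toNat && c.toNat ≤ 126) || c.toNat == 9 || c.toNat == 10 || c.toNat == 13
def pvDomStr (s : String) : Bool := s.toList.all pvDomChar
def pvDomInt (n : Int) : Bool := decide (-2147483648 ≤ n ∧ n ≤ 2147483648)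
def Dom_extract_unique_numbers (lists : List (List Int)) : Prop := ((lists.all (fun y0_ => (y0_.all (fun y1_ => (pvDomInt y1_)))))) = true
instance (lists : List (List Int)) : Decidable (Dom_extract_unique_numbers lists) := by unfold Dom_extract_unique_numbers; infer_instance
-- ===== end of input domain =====

-- B rebuilds common_numbers/unique_numbers from the materialized columns instead of A's single overwriting fold.

-- zip(*lists): the list of columns, truncated to the shortest sublist (shared builtin of both sources)
def pvMinLen (lists : List (List Int)) : Nat :=
  match lists with
  | [] => 0
  | l :: rest => rest.foldl (fun m x => min m x.length) l.length

def pvCols (lists : List (List Int)) : List (List Int) :=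
  (List.range (pvMinLen lists)).map (fun j => lists.map (fun l => l.getD j 0))

-- ===== PORT A =====
-- for cont, columns in enumerate(zip(*lists)): one fold over state (common_numbers, unique_numbers, indice_column)
-- columns[0] is ported as headD 0: the branch only runs when len(set(columns)) == 1, so columns is nonempty there.
def extract_unique_numbers (lists : List (List Int)) : List Int × List Int × Option Int :=
  let st := (PySem.List.enumerate (pvCols lists)).foldl
    (fun (st : List Int × List Int × Option Int) x =>
      if (PySem.Set.ofList x.2).length = 1 then
        (st.1 ++ [x.2.headD 0], st.2.1, st.2.2)
      else
        (st.1, x.2, some x.1))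
    ([], [], none)
  (st.2.1, st.1, st.2.2)

-- ===== PORT B =====
-- backward scan with break: first non-uniform column from the end of the indexed column list
def pvFindBroken (xs : List (Int × List Int)) : List Int × Option Int :=
  match xs with
  | [] => ([], none)
  | x :: rest =>
    if 1 < (PySem.Set.ofList x.2).length then (x.2, some x.1) else pvFindBroken rest

def extract_unique_numbers_alt (lists : List (List Int)) : List Int × List Int × Option Int :=
  let cols := pvCols lists
  let common := (cols.filter (fun c => (PySem.Set.ofList c).length = 1)).map (fun c => c.headD 0)
  let bu := pvFindBroken (PySem.List.enumerate cols).reverse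
  (bu.1, common, bu.2)

-- ===== PRECONDITION & SPEC =====
def Spec_extract_unique_numbers (lists : List (List Int)) (out : List Int × List Int × Option Int) : Prop := out = extract_unique_numbers_alt lists
instance (lists : List (List Int)) (out : List Int × List Int × Option Int) : Decidable (Spec_extract_unique_numbers lists out) := by unfold Spec_extract_unique_numbers; infer_instance

-- ===== CLAIM (what is proved, stated in full; the proofs are below) =====
def Claim_equal_extract_unique_numbers : Prop := ∀ (lists : List (List Int)), Dom_extract_unique_numbers lists → Spec_extract_unique_numbers lists (extract_unique_numbers lists)

-- ===== LEMMAS AND PROOFS =====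

-- a not-found result of pvFindBroken is exactly the sentinel ([], none)
theorem pvFindBroken_none {xs : List (Int × List Int)} (h : (pvFindBroken xs).2 = none) :
    pvFindBroken xs = ([], none) := by
  induction xs with
  | nil => rfl
  | cons x rest ih =>
    by_cases hc : 1 < (PySem.Set.ofList x.2).length
    · simp [pvFindBroken, hc] at h
    · simpa [pvFindBroken, hc] using ih (by simpa [pvFindBroken, hc] using h)

theorem pvFindBroken_append (l : List (Int × List Int)) (y : Int × List Int) :
    pvFindBroken (l ++ [y]) =
      if (pvFindBroken l).2 = none then
        (if 1 < (PySem.Set.ofList y.2).length then (y.2, some y.1) else pvFindBroken l)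
      else pvFindBroken l := by
  induction l with
  | nil => simp [pvFindBroken]
  | cons x rest ih =>
    by_cases hc : 1 < (PySem.Set.ofList x.2).length
    · simp [pvFindBroken, hc]
    · simpa [pvFindBroken, hc] using ih

-- forward "last broken wins" fold (A's (unique, idx) component) equals B's backward scan
theorem lastBroken_eq_findBroken (xs : List (Int × List Int))
    (hne : ∀ x ∈ xs, x.2 ≠ []) (d : List Int × Option Int) :
    xs.foldl (fun s x => if (PySem.Set.ofList x.2).length = 1 then s else (x.2, some x.1)) d
      = if (pvFindBroken xs.reverse).2 = none then d else pvFindBroken xs.reverse := by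
  induction xs generalizing d with
  | nil => simp [pvFindBroken]
  | cons x rest ih =>
    have hx : x.2 ≠ [] := hne x (by simp)
    have hlen : 1 ≤ (PySem.Set.ofList x.2).length := by
      obtain ⟨a, t, h2⟩ := List.exists_cons_of_ne_nil hx
      have : a ∈ PySem.Set.ofList x.2 := by
        rw [PySem.Set.mem_ofList, h2]; simp
      exact List.length_pos_of_mem this
    have hne' : ∀ z ∈ rest, z.2 ≠ [] := fun z hz => hne z (by simp [hz])
    have hrev : (x :: rest).reverse = rest.reverse ++ [x] := by simp
    rw [List.foldl_cons, hrev, pvFindBroken_append]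
    by_cases hc : (PySem.Set.ofList x.2).length = 1
    · have hnl : ¬ 1 < (PySem.Set.ofList x.2).length := by omega
      rw [if_pos hc, ih hne' d]
      simp [hnl]
    · have hlt : 1 < (PySem.Set.ofList x.2).length := by omega
      rw [if_neg hc, ih hne' (x.2, some x.1)]
      by_cases hn : (pvFindBroken rest.reverse).2 = none
      · simp [hn, hlt]
      · simp [hn, hlt]

-- A's whole fold, split into its common and (unique, idx) components
theorem foldA_split (xs : List (Int × List Int)) (c0 : List Int) (d : List Int × Option Int) :
    xs.foldl
      (fun (st : List Int × List Int × Option Int) x =>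
        if (PySem.Set.ofList x.2).length = 1 then
          (st.1 ++ [x.2.headD 0], st.2.1, st.2.2)
        else
          (st.1, x.2, some x.1))
      (c0, d)
      = (c0 ++ (xs.filter (fun x => (PySem.Set.ofList x.2).length = 1)).map (fun x => x.2.headD 0),
         xs.foldl (fun s x => if (PySem.Set.ofList x.2).length = 1 then s else (x.2, some x.1)) d) := by
  induction xs generalizing c0 d with
  | nil => simp
  | cons x rest ih =>
    rw [List.foldl_cons]
    by_cases hc : (PySem.Set.ofList x.2).length = 1
    · rw [if_pos hc, ih]
      simp [List.filter_cons, hc]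
    · rw [if_neg hc, ih]
      simp [List.filter_cons, hc]

-- filtering/mapping the enumerated columns through .2 equals filtering/mapping the columns
theorem filter_map_enumerate (l : List (List Int)) (s : Int) :
    ((PySem.List.enumerate l s).filter (fun x => (PySem.Set.ofList x.2).length = 1)).map (fun x => x.2.headD 0)
      = (l.filter (fun c => (PySem.Set.ofList c).length = 1)).map (fun c => c.headD 0) := by
  induction l generalizing s with
  | nil => simp [PySem.List.enumerate_nil]
  | cons c rest ih =>
    by_cases hc : (PySem.Set.ofList c).length = 1
    · simp [PySem.List.enumerate_cons, List.filter_cons, hc]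
      simpa using ih (s + 1)
    · simp [PySem.List.enumerate_cons, List.filter_cons, hc]
      simpa using ih (s + 1)

theorem cols_ne_nil (lists : List (List Int)) : ∀ c ∈ pvCols lists, c ≠ [] := by
  intro c hc
  rcases lists with _ | ⟨l, rest⟩
  · simp [pvCols, pvMinLen] at hc
  · simp only [pvCols, List.mem_map] at hc
    rcases hc with ⟨j, _, rfl⟩
    simp

theorem enum_cols_ne_nil (lists : List (List Int)) :
    ∀ x ∈ PySem.List.enumerate (pvCols lists), x.2 ≠ [] := by
  intro x hx
  rw [PySem.List.mem_enumerate_iff] at hx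
  rcases hx with ⟨k, hk, rfl⟩
  exact cols_ne_nil lists _ (by exact List.getElem_mem hk)

-- ===== VERDICT (by name: the statement is the Claim_ definition above) =====
theorem extract_unique_numbers_spec : Claim_equal_extract_unique_numbers := by
  intro lists _
  unfold Spec_extract_unique_numbers extract_unique_numbers extract_unique_numbers_alt
  rw [show (([], [], none) : List Int × List Int × Option Int) = (([] : List Int), (([] : List Int), (none : Option Int))) from rfl]
  rw [foldA_split, lastBroken_eq_findBroken _ (enum_cols_ne_nil lists) ([], none),
      filter_map_enumerate]
  by_cases hn : (pvFindBroken (PySem.List.enumerate (pvCols lists)).reverse).2 = none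
  · simp [hn, pvFindBroken_none hn]
  · simp [hn]
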